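-- pv_equiv track=rewrite | github.com/adbi13/python-tasks | basics/solution/02-strings.py | mask_card_number
-- ===== SOURCE A (Python) =====
-- def mask_card_number(card_number):
--     masked_number = card_number[:4]
--     for character in card_number[4:]:
--         if character == " ":
--             masked_number += " "
--         else:
--             masked_number += "*"
--     return masked_number
-- ===== SOURCE B (Python) =====
-- def mask_card_number(card_number):
--     head, tail = card_number[:4], card_number[4:]
--     return head + " ".join("*" * len(chunk) for chunk in tail.split(" "))
-- ===== Notes on version B (the rewrite author's own statement) =====
-- stated objective: faster
-- what changed: Instead of testing and appending each character, B splits the tail on spaces, replaces each chunk by a star-run of the same length, and rejoins with spaces, so the work is chunk-level string operations rather than a per-character Python loop.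
import Mathlib
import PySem

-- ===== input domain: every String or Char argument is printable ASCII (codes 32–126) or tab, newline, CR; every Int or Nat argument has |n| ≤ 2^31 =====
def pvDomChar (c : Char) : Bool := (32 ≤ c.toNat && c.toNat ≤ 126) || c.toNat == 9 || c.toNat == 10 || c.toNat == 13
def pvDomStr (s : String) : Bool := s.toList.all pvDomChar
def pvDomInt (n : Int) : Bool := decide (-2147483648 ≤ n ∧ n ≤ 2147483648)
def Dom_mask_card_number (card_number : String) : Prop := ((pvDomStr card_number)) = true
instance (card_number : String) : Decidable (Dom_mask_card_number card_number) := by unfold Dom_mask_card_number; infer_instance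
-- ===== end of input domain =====

-- B splits the tail on spaces, replaces each chunk by a run of '*' of its length, and rejoins with spaces, instead of A's per-character loop with an accumulator.


-- ===== PORT A =====
-- card_number[:4] = take 4, card_number[4:] = drop 4 (exact: nonnegative literal slices);
-- the string accumulator is the list of chars, '+=' is '++ [c]'.
def mask_card_number (card_number : String) : String :=
  String.ofList
    ((card_number.toList.drop 4).foldl
      (fun masked c => if c == ' ' then masked ++ [' '] else masked ++ ['*'])
      (card_number.toList.take 4))

-- ===== PORT B =====
-- tail.split(" ") keeps empty chunks and '' splits to [''], exactly List.splitOn ' ';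
-- "*" * len(chunk) = List.replicate, " ".join = List.intercalate [' '].
def mask_card_number_alt (card_number : String) : String :=
  String.ofList
    (card_number.toList.take 4 ++
      List.intercalate [' ']
        (((card_number.toList.drop 4).splitOn ' ').map
          (fun chunk => List.replicate chunk.length '*')))

-- ===== PRECONDITION & SPEC =====
def Spec_mask_card_number (card_number : String) (out : String) : Prop := out = mask_card_number_alt card_number
instance (card_number : String) (out : String) : Decidable (Spec_mask_card_number card_number out) := by unfold Spec_mask_card_number; infer_instance

-- ===== CLAIM (what is proved, stated in full; the proofs are below) =====
def Claim_equal_mask_card_number : Prop := ∀ (card_number : String), Dom_mask_card_number card_number → Spec_mask_card_number card_number (mask_card_number card_number)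

-- ===== LEMMAS AND PROOFS =====
theorem mask_fold_eq_map (l : List Char) (acc : List Char) :
    l.foldl (fun masked c => if c == ' ' then masked ++ [' '] else masked ++ ['*']) acc
      = acc ++ l.map (fun c => if c == ' ' then c else '*') := by
  induction l generalizing acc with
  | nil => simp
  | cons c l ih =>
    simp only [List.foldl_cons, List.map_cons]
    by_cases hc : (c == ' ') = true
    · rw [if_pos hc, if_pos hc, ih]
      have hce : c = ' ' := beq_iff_eq.mp hc
      subst hce; simp
    · rw [if_neg hc, if_neg hc, ih]; simp

theorem intercalate_modifyHead_cons (a : Char) (sep : List Char) (xs : List (List Char))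
    (h : xs ≠ []) :
    List.intercalate sep (xs.modifyHead (List.cons a)) = a :: List.intercalate sep xs := by
  cases xs with
  | nil => contradiction
  | cons x xs =>
    cases xs with
    | nil => simp [List.intercalate]
    | cons y ys => simp [List.intercalate, List.intersperse]

theorem split_stars_eq_map (l : List Char) :
    List.intercalate [' ']
        ((l.splitOn ' ').map (fun chunk => List.replicate chunk.length '*'))
      = l.map (fun c => if c == ' ' then c else '*') := by
  induction l with
  | nil => simp [List.splitOn, List.splitOnP_nil, List.intercalate]
  | cons c l ih =>
    simp only [List.splitOn] at *
    rw [List.splitOnP_cons]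
    by_cases hc : (c == ' ') = true
    · rw [if_pos hc]
      have hce : c = ' ' := beq_iff_eq.mp hc
      subst hce
      simp only [List.map]
      cases hxs : (l.splitOnP (fun x => x == ' ')) with
      | nil => exact absurd hxs (List.splitOnP_ne_nil _ _)
      | cons y ys =>
        rw [hxs] at ih
        simp [List.intercalate] at ih ⊢
        simpa using ih
    · rw [if_neg hc]
      have hmap : ((l.splitOnP (fun x => x == ' ')).modifyHead (List.cons c)).map
          (fun chunk => List.replicate chunk.length '*')
          = ((l.splitOnP (fun x => x == ' ')).map
              (fun chunk => List.replicate chunk.length '*')).modifyHead (List.cons '*') := by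
        cases l.splitOnP (fun x => x == ' ') with
        | nil => rfl
        | cons y ys => simp [List.replicate]
      rw [hmap, intercalate_modifyHead_cons]
      · rw [ih]; simp only [List.map_cons]; rw [if_neg hc]
      · intro h
        exact List.splitOnP_ne_nil _ _ (List.map_eq_nil_iff.mp h)

-- ===== VERDICT (by name: the statement is the Claim_ definition above) =====
theorem mask_card_number_spec : Claim_equal_mask_card_number := by
  intro s _
  unfold Spec_mask_card_number mask_card_number mask_card_number_alt
  rw [mask_fold_eq_map, split_stars_eq_map]
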